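-- pv_equiv track=rewrite | github.com/MaximillianMcInnes/Cipher_challenge_redo | backend/sauds/PolySubstitution.py | generate_custom_key
-- ===== SOURCE A (Python) =====
-- alphabet = "ABCDEFGHIJKLMNOPQRSTUVWXYZ"
--
-- def generate_custom_key(cipher: list[str]):
-- 	grams = {}
-- 	letter = 0
-- 	for i in range(len(cipher)):
-- 		if cipher[i] not in grams.keys():
-- 			grams[cipher[i]] = alphabet[letter]
-- 			letter += 1
-- 	return grams
-- ===== SOURCE B (Python) =====
-- alphabet = "ABCDEFGHIJKLMNOPQRSTUVWXYZ"
--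
-- def generate_custom_key(cipher: list[str]):
--     # Rank-by-first-occurrence: gather each distinct element's first index,
--     # sort those indices, and pair them positionally with the alphabet.
--     idxs = sorted(cipher.index(c) for c in set(cipher))
--     return {cipher[i]: a for i, a in zip(idxs, alphabet)}
-- ===== Notes on version B (the rewrite author's own statement) =====
-- stated objective: alternative
-- what changed: Replaces A's single stateful scan (membership test against the growing dict plus a running letter counter) by a rank-by-first-occurrence algorithm: collect each distinct element's first-occurrence index via set(cipher), sort those indices, and zip them positionally with the alphabet.
import Mathlib
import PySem

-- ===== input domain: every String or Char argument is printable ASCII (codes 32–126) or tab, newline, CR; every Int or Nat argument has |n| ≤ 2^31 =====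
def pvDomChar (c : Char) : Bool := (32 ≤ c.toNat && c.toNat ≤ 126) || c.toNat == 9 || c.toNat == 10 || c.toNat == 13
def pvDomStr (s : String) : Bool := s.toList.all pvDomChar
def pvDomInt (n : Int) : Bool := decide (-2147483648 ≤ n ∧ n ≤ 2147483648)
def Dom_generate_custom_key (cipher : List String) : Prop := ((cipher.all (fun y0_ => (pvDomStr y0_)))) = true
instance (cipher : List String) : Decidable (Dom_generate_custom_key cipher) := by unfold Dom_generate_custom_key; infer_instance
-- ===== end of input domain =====

-- B replaces A's single stateful scan (dict membership + running letter counter) by a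
-- rank-by-first-occurrence algorithm: collect each distinct element's first index, sort
-- those indices, and zip them positionally with the alphabet (alternative algorithm).


-- ===== PORT A =====
def pvAlphabet : String := "ABCDEFGHIJKLMNOPQRSTUVWXYZ"

-- one iteration of A's for-loop: state = (grams, letter); Python raises IndexError exactly
-- where pyGet? is none (those inputs are excluded by Pre_), the port keeps the state there
def pvStepA (st : PySem.Dict String String × Int) (c : String) : PySem.Dict String String × Int :=
  if st.1.contains c then st
  else
    match PySem.Str.pyGet? pvAlphabet st.2 with
    | some ch => (st.1.insert c (String.ofList [ch]), st.2 + 1)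
    | none => st

def generate_custom_key (cipher : List String) : List (String × String) :=
  (cipher.foldl pvStepA (PySem.Dict.empty, 0)).1.items

-- ===== PORT B =====
-- cipher.index(c): exact, since c is drawn from set(cipher) the index is always found
def pvIdx (cipher : List String) (c : String) : Int :=
  ((PySem.List.index? cipher c).getD 0 : Nat)

-- iterating the string `alphabet` yields its characters as length-1 strings
def pvLetters : List String := pvAlphabet.toList.map (fun ch => String.ofList [ch])

def generate_custom_key_alt (cipher : List String) : List (String × String) :=
  let idxs := PySem.List.sorted ((PySem.Set.ofList cipher).map (pvIdx cipher)) (fun x => x) false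
  -- cipher[i]: exact, every i in idxs is a valid non-negative index of cipher
  ((idxs.zip pvLetters).foldl
      (fun (d : PySem.Dict String String) p => d.insert (PySem.List.pyGetD cipher p.1 "") p.2)
      PySem.Dict.empty).items

-- ===== PRECONDITION & SPEC =====
-- Pre_ excludes inputs with more than 26 distinct elements, on which A raises IndexError.
def Pre_generate_custom_key (cipher : List String) : Prop :=
  (PySem.List.dedup cipher).length ≤ 26

instance (cipher : List String) : Decidable (Pre_generate_custom_key cipher) := by
  unfold Pre_generate_custom_key; infer_instance

def pvWitness_generate_custom_key : List String := ["AB", "CD", "AB", "e"]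

def Spec_generate_custom_key (cipher : List String) (out : List (String × String)) : Prop :=
  out = generate_custom_key_alt cipher
instance (cipher : List String) (out : List (String × String)) : Decidable (Spec_generate_custom_key cipher out) := by unfold Spec_generate_custom_key; infer_instance

-- ===== CLAIM (what is proved, stated in full; the proofs are below) =====
def Claim_equal_generate_custom_key : Prop := ∀ (cipher : List String), Dom_generate_custom_key cipher → Pre_generate_custom_key cipher → Spec_generate_custom_key cipher (generate_custom_key cipher)

-- ===== LEMMAS AND PROOFS =====

-- the letter assigned to position i (as the per-position value, when in range)
def pvLetter (i : Int) : String :=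
  match PySem.Str.pyGet? pvAlphabet i with
  | some ch => String.ofList [ch]
  | none => ""

-- the dict both programs build over a seen-list s: s[k] ↦ alphabet[k]
def pvDictOf (s : List String) : PySem.Dict String String :=
  (PySem.List.enumerate s).foldl
    (fun (d : PySem.Dict String String) p =>
      match PySem.Str.pyGet? pvAlphabet p.1 with
      | some ch => d.insert p.2 (String.ofList [ch])
      | none => d)
    PySem.Dict.empty

lemma pvAlphabet_get (n : Nat) (h : n < 26) :
    ∃ ch, PySem.Str.pyGet? pvAlphabet (n : Int) = some ch := by
  have h' : n < pvAlphabet.toList.length := by simpa [pvAlphabet] using h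
  exact ⟨pvAlphabet.toList[n], by
    rw [PySem.Str.pyGet?_natCast]; exact List.getElem?_eq_getElem h'⟩

lemma pvDictOf_append (s : List String) (c : String) :
    pvDictOf (s ++ [c]) =
      match PySem.Str.pyGet? pvAlphabet (s.length : Int) with
      | some ch => (pvDictOf s).insert c (String.ofList [ch])
      | none => pvDictOf s := by
  simp [pvDictOf, PySem.List.enumerate_append, PySem.List.enumerate_cons]

lemma pvDictOf_eq_insertFold (s : List String) (hs : s.length ≤ 26) :
    pvDictOf s =
      (PySem.List.enumerate s).foldl
        (fun (d : PySem.Dict String String) p => d.insert p.2 (pvLetter p.1))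
        PySem.Dict.empty := by
  unfold pvDictOf
  apply PySem.List.foldl_congr_mem
  intro acc p hp
  obtain ⟨k, hk, rfl⟩ := (PySem.List.mem_enumerate_iff s 0 p).mp hp
  obtain ⟨ch, hch⟩ := pvAlphabet_get k (by omega)
  simp only [zero_add] at *
  rw [PySem.Str.pyGet?_natCast] at hch
  simp [hch, pvLetter]

lemma pvDictOf_contains (s : List String) (hs : s.length ≤ 26) (c : String) :
    (pvDictOf s).contains c = decide (c ∈ s) := by
  rw [PySem.Dict.contains_eq_decide_mem_keys, pvDictOf_eq_insertFold s hs]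
  rw [PySem.Dict.keys_foldl_insert_key (PySem.List.enumerate s) (·.2) (fun _ p => pvLetter p.1) PySem.Dict.empty]
  simp only [PySem.Dict.keys_empty, PySem.List.map_snd_enumerate]
  have : PySem.Set.update ([] : PySem.Set String) s = PySem.Set.ofList s := rfl
  simp [this, PySem.Set.mem_ofList]

-- the seen set only gets appended to as the loop runs
lemma pvUpdate_prefix (l : List String) (s : PySem.Set String) :
    s <+: PySem.Set.update s l := by
  induction l generalizing s with
  | nil => simp [PySem.Set.update]
  | cons c t ih =>
      have h1 : s <+: PySem.Set.add s c := by
        by_cases h : c ∈ s <;> simp [PySem.Set.add, h]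
      calc s <+: PySem.Set.add s c := h1
        _ <+: PySem.Set.update (PySem.Set.add s c) t := by
              simpa [PySem.Set.update] using ih (PySem.Set.add s c)
        _ = PySem.Set.update s (c :: t) := by simp [PySem.Set.update]

-- loop invariant for A: starting from the dict built over a seen-list s (with letter = |s|),
-- the loop ends in the dict built over Set.update s l
lemma pvLoopA (l : List String) (s : PySem.Set String)
    (hlen : (PySem.Set.update s l).length ≤ 26) :
    l.foldl pvStepA (pvDictOf s, (s.length : Int)) =
      (pvDictOf (PySem.Set.update s l), ((PySem.Set.update s l).length : Int)) := by
  induction l generalizing s with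
  | nil => simp [PySem.Set.update]
  | cons c t ih =>
      have hupd : PySem.Set.update s (c :: t) = PySem.Set.update (PySem.Set.add s c) t := by
        simp [PySem.Set.update]
      rw [hupd] at hlen ⊢
      have hs26 : s.length ≤ 26 := by
        have h1 : s <+: PySem.Set.add s c := by
          by_cases h : c ∈ s <;> simp [PySem.Set.add, h]
        have h2 := (h1.trans (pvUpdate_prefix t (PySem.Set.add s c))).length_le
        omega
      by_cases hc : c ∈ s
      · have hadd : PySem.Set.add s c = s := by simp [PySem.Set.add, hc]
        have hstep : pvStepA (pvDictOf s, (s.length : Int)) c = (pvDictOf s, (s.length : Int)) := by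
          simp [pvStepA, pvDictOf_contains s hs26, hc]
        rw [hadd] at hlen
        rw [List.foldl_cons, hstep, hadd]
        exact ih s hlen
      · have hadd : PySem.Set.add s c = s ++ [c] := by simp [PySem.Set.add, hc]
        rw [hadd] at hlen
        have hslt : s.length < 26 := by
          have h2 := (pvUpdate_prefix t (s ++ [c])).length_le
          simp at h2
          omega
        obtain ⟨ch, hch⟩ := pvAlphabet_get s.length hslt
        rw [PySem.Str.pyGet?_natCast] at hch
        have hstep : pvStepA (pvDictOf s, (s.length : Int)) c =
            (pvDictOf (s ++ [c]), ((s ++ [c]).length : Int)) := by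
          simp [pvStepA, pvDictOf_contains s hs26, hc, hch, pvDictOf_append]
        rw [List.foldl_cons, hstep, hadd]
        exact ih (s ++ [c]) hlen

-- ---- B-side lemmas ----

-- for c ∈ cipher, index? finds a valid index whose element is c
lemma pvIdx_spec (cipher : List String) (c : String) (hc : c ∈ cipher) :
    ∃ k : Nat, PySem.List.index? cipher c = some k ∧ k < cipher.length ∧ cipher[k]? = some c := by
  obtain ⟨k, hk⟩ := Option.isSome_iff_exists.mp ((PySem.List.index?_isSome_iff cipher c).mpr hc)
  obtain ⟨hlt, hget, _⟩ := PySem.List.getElem_of_index?_eq_some hk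
  exact ⟨k, hk, hlt, by rw [List.getElem?_eq_getElem hlt, hget]⟩

-- cipher[cipher.index(c)] = c
lemma pvGet_pvIdx (cipher : List String) (c : String) (hc : c ∈ cipher) :
    PySem.List.pyGetD cipher (pvIdx cipher c) "" = c := by
  obtain ⟨k, hk, hlt, hget⟩ := pvIdx_spec cipher c hc
  unfold pvIdx
  rw [hk]
  simp [PySem.List.pyGetD_natCast, List.getD, hget]

-- first-occurrence indices are strictly increasing along set(cipher)'s order
lemma pvIdx_pairwise (cipher : List String) :
    ((PySem.Set.ofList cipher).map (pvIdx cipher)).Pairwise (· < ·) := by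
  induction cipher using List.reverseRecOn with
  | nil => simp [PySem.Set.ofList]
  | append_singleton xs x ih =>
      have hofl : PySem.Set.ofList (xs ++ [x]) = PySem.Set.add (PySem.Set.ofList xs) x := by
        simp [PySem.Set.ofList_eq_foldl]
      have hcongr : (PySem.Set.ofList xs).map (pvIdx (xs ++ [x])) =
          (PySem.Set.ofList xs).map (pvIdx xs) := by
        apply List.map_congr_left
        intro c hc
        have hcx : c ∈ xs := (PySem.Set.mem_ofList xs c).mp hc
        unfold pvIdx
        rw [PySem.List.index?_append_of_mem [x] hcx]
      by_cases hx : x ∈ xs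
      · have : PySem.Set.add (PySem.Set.ofList xs) x = PySem.Set.ofList xs := by
          simp [PySem.Set.add, PySem.Set.mem_ofList, hx]
        rw [hofl, this, hcongr]; exact ih
      · have : PySem.Set.add (PySem.Set.ofList xs) x = PySem.Set.ofList xs ++ [x] := by
          simp [PySem.Set.add, PySem.Set.mem_ofList, hx]
        rw [hofl, this, List.map_append, hcongr]
        simp only [List.map_cons, List.map_nil, List.pairwise_append]
        refine ⟨ih, by simp, ?_⟩
        intro a ha b hb
        simp only [List.mem_singleton] at hb
        subst hb
        obtain ⟨c, hc, rfl⟩ := List.mem_map.mp ha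
        have hcx : c ∈ xs := (PySem.Set.mem_ofList xs c).mp hc
        obtain ⟨k, hk, hlt, _⟩ := pvIdx_spec xs c hcx
        have h1 : pvIdx xs c = (k : Int) := by unfold pvIdx; rw [hk]; rfl
        have h2 : pvIdx (xs ++ [x]) x = (xs.length : Int) := by
          unfold pvIdx
          rw [PySem.List.index?_append_singleton_self xs x hx]; rfl
        rw [h1, h2]
        exact_mod_cast hlt

-- alphabet letters: list element vs per-position value
lemma pvLetters_getElem (n : Nat) (h : n < 26) :
    pvLetters[n]'(by simpa [pvLetters, pvAlphabet] using h) = pvLetter (n : Int) := by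
  have h' : n < pvAlphabet.toList.length := by simpa [pvAlphabet] using h
  simp [pvLetters, pvLetter, List.getElem?_eq_getElem h']

lemma pvLetters_length : pvLetters.length = 26 := by decide

-- the positional zip with the alphabet builds the same dict as the enumerate fold
lemma pvZipEnum (s : List String) (n : Nat) (d : PySem.Dict String String)
    (h : n + s.length ≤ 26) :
    (s.zip (pvLetters.drop n)).foldl
        (fun (d : PySem.Dict String String) p => d.insert p.1 p.2) d
      = (PySem.List.enumerate s (n : Int)).foldl
        (fun (d : PySem.Dict String String) p => d.insert p.2 (pvLetter p.1)) d := by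
  induction s generalizing n d with
  | nil => simp [PySem.List.enumerate_nil]
  | cons x t ih =>
      have hn : n < pvLetters.length := by rw [pvLetters_length]; simp at h; omega
      rw [List.drop_eq_getElem_cons hn, List.zip_cons_cons, List.foldl_cons,
        PySem.List.enumerate_cons, List.foldl_cons, pvLetters_getElem n (by simpa [pvLetters_length] using hn)]
      have : ((n : Int) + 1) = ((n + 1 : Nat) : Int) := by push_cast; ring
      rw [this]
      exact ih (n + 1) _ (by simp at h ⊢; omega)

-- ===== VERDICT (by name: the statement is the Claim_ definition above) =====
theorem generate_custom_key_spec : Claim_equal_generate_custom_key := by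
  intro cipher _hdom hpre
  unfold Spec_generate_custom_key generate_custom_key generate_custom_key_alt
  have hofl : PySem.List.dedup cipher = PySem.Set.ofList cipher :=
    PySem.List.dedup_eq_ofList cipher
  have hpre' : (PySem.Set.ofList cipher).length ≤ 26 := by rw [← hofl]; exact hpre
  -- A's side: the loop builds pvDictOf (set(cipher))
  have hupd : PySem.Set.update ([] : PySem.Set String) cipher = PySem.Set.ofList cipher := rfl
  have hlen : (PySem.Set.update ([] : PySem.Set String) cipher).length ≤ 26 := by
    rw [hupd]; exact hpre'
  have hA := pvLoopA cipher [] hlen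
  have hinit : pvDictOf [] = PySem.Dict.empty := rfl
  rw [hinit] at hA
  simp only [List.length_nil, Nat.cast_zero] at hA
  rw [hA, hupd]
  -- B's side
  set s := PySem.Set.ofList cipher with hs
  -- the generated indices are already strictly increasing, so sorted is the identity
  have hsorted : PySem.List.sorted (s.map (pvIdx cipher)) (fun x => x) false
      = s.map (pvIdx cipher) :=
    PySem.List.sorted_eq_of_perm_of_pairwise_lt _ _ (fun x => x) (List.Perm.refl _) (by
      simpa using pvIdx_pairwise cipher)
  show (pvDictOf s).items =
    (((PySem.List.sorted (s.map (pvIdx cipher)) (fun x => x) false).zip pvLetters).foldl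
      (fun (d : PySem.Dict String String) p => d.insert (PySem.List.pyGetD cipher p.1 "") p.2)
      PySem.Dict.empty).items
  rw [hsorted, List.zip_map_left, List.foldl_map]
  -- cipher[idx c] = c for every c coming from the zip
  have hmem : ∀ (d : PySem.Dict String String) (p : String × String), p ∈ s.zip pvLetters →
      d.insert (PySem.List.pyGetD cipher (pvIdx cipher p.1) "") p.2 = d.insert p.1 p.2 := by
    intro d p hp
    have h1 : p.1 ∈ s := List.of_mem_zip hp |>.1
    have h2 : p.1 ∈ cipher := (PySem.Set.mem_ofList cipher p.1).mp h1
    rw [pvGet_pvIdx cipher p.1 h2]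
  rw [PySem.List.foldl_congr_mem _ _ _ _ (by
      intro acc p hp
      simpa using hmem acc p hp)]
  rw [show pvLetters = pvLetters.drop 0 from rfl,
    pvZipEnum s 0 PySem.Dict.empty (by simpa using hpre')]
  rw [pvDictOf_eq_insertFold s hpre']
  rfl
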